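-- pv_equiv track=rewrite | github.com/BALaka-18/IEM_Coding-5th-Semester | B_126_Day3.py | longEven
-- ===== SOURCE A (Python) =====
-- def longEven(s):
--     l = list(filter(lambda x: len(x)%2 == 0, s.split()))
--     word,m = l[0],len(l[0])
--     for w in l[1:]:
--         if len(w) > m:
--             m = len(w)
--             word = w
--         else:
--             continue
--     return word
-- ===== SOURCE B (Python) =====
-- def longEven(s):
--     evens = [w for w in s.split() if len(w) % 2 == 0]
--     return sorted(evens, key=len, reverse=True)[0]
-- ===== Notes on version B (the rewrite author's own statement) =====
-- stated objective: alternative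
-- what changed: Replaces the running-max loop with a stable reverse sort by length followed by taking the first element; stability makes the first longest word win ties exactly as A's strict '>' does.
import Mathlib
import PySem

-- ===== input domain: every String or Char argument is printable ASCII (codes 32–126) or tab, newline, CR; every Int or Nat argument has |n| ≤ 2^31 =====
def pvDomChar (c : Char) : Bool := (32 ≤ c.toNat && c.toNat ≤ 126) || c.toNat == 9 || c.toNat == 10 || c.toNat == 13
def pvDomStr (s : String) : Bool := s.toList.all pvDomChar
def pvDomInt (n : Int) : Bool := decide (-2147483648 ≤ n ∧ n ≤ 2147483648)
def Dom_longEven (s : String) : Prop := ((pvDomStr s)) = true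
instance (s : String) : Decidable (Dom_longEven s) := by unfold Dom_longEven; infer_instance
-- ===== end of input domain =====

-- B replaces A's running-max loop by a stable reverse sort by length and taking the head (alternative decomposition, not faster).

-- ===== PORT A =====
-- l[0] raises IndexError when no word has even length; those inputs are excluded by Pre_ below ("" is never reached under Pre_).
def longEven (s : String) : String :=
  let l := (PySem.Str.split₀ s).filter (fun x => PySem.Int.mod (PySem.Str.len x) 2 == 0)
  match l with
  | [] => ""
  | w0 :: rest =>
    (rest.foldl (fun (wm : String × Int) w =>
        if PySem.Str.len w > wm.2 then (w, PySem.Str.len w) else wm)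
      (w0, PySem.Str.len w0)).1

-- ===== PORT B =====
-- sorted(evens, key=len, reverse=True)[0]; the [0] raises on empty, excluded by Pre_ ("" never reached under Pre_).
def longEven_alt (s : String) : String :=
  let evens := (PySem.Str.split₀ s).filter (fun x => PySem.Int.mod (PySem.Str.len x) 2 == 0)
  (PySem.List.sorted evens (fun w => PySem.Str.len w) true).headD ""

-- ===== PRECONDITION & SPEC =====
-- Pre_ excludes exactly the inputs with no even-length word, where both Pythons raise IndexError.
def Pre_longEven (s : String) : Prop :=
  (PySem.Str.split₀ s).filter (fun x => PySem.Int.mod (PySem.Str.len x) 2 == 0) ≠ []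
instance (s : String) : Decidable (Pre_longEven s) := by unfold Pre_longEven; infer_instance
def pvWitness_longEven : String := "ab cdef gh"

def Spec_longEven (s : String) (out : String) : Prop := out = longEven_alt s
instance (s : String) (out : String) : Decidable (Spec_longEven s out) := by unfold Spec_longEven; infer_instance

-- ===== CLAIM (what is proved, stated in full; the proofs are below) =====
def Claim_equal_longEven : Prop := ∀ (s : String), Dom_longEven s → Pre_longEven s → Spec_longEven s (longEven s)

-- ===== LEMMAS AND PROOFS =====
-- Unfolding step of PySem.List.insertBy on a cons cell (definitional).
theorem insertBy_cons (before : String → String → Bool) (x y : String) (ys : List String) :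
    PySem.List.insertBy before x (y :: ys)
      = if before x y then x :: y :: ys else y :: PySem.List.insertBy before x ys := rfl

-- Invariant: if the head of the accumulator is key-maximal in it, inserting the rest keeps the head
-- equal to A's running (word, max) state's first component.
theorem head_insert_fold (rest : List String) (h : String) (t : List String)
    (hmax : ∀ y ∈ t, PySem.Str.len y ≤ PySem.Str.len h) :
    (List.foldl (fun acc x =>
        PySem.List.insertBy (fun a b => decide (PySem.Str.len b < PySem.Str.len a)) x acc)
      (h :: t) rest).headD ""
    = (rest.foldl (fun (wm : String × Int) w =>
        if PySem.Str.len w > wm.2 then (w, PySem.Str.len w) else wm) (h, PySem.Str.len h)).1 := by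
  induction rest generalizing h t with
  | nil => simp
  | cons x xs ih =>
    simp only [List.foldl_cons, insertBy_cons]
    by_cases hx : PySem.Str.len h < PySem.Str.len x
    · rw [if_pos (decide_eq_true hx),
        show (if PySem.Str.len x > (h, PySem.Str.len h).2 then (x, PySem.Str.len x)
              else (h, PySem.Str.len h)) = (x, PySem.Str.len x) from if_pos hx]
      exact ih x (h :: t) (by
        intro y hy
        rcases List.mem_cons.mp hy with rfl | hy
        · exact le_of_lt hx
        · exact le_trans (hmax y hy) (le_of_lt hx))
    · rw [if_neg (by simpa using hx),
        show (if PySem.Str.len x > (h, PySem.Str.len h).2 then (x, PySem.Str.len x)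
              else (h, PySem.Str.len h)) = (h, PySem.Str.len h) from if_neg hx]
      exact ih h _ (by
        intro y hy
        have hmem := (PySem.List.mem_insertBy
          (before := fun a b => decide (PySem.Str.len b < PySem.Str.len a))
          (x := x) (ys := t) (y := y)).mp hy
        rcases hmem with rfl | hy'
        · exact le_of_not_gt hx
        · exact hmax y hy')

-- ===== VERDICT (by name: the statement is the Claim_ definition above) =====
theorem longEven_spec : Claim_equal_longEven := by
  intro s _ hpre
  unfold Spec_longEven longEven longEven_alt
  cases hcase : (PySem.Str.split₀ s).filter (fun x => PySem.Int.mod (PySem.Str.len x) 2 == 0) with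
  | nil => exact absurd hcase hpre
  | cons w0 rest =>
    show (rest.foldl (fun (wm : String × Int) w =>
        if PySem.Str.len w > wm.2 then (w, PySem.Str.len w) else wm) (w0, PySem.Str.len w0)).1
      = (PySem.List.sorted (w0 :: rest) (fun w => PySem.Str.len w) true).headD ""
    rw [PySem.List.sorted_rev_eq_foldl_insertBy]
    simp only [List.foldl_cons]
    rw [show PySem.List.insertBy (fun a b => decide (PySem.Str.len b < PySem.Str.len a)) w0
        ([] : List String) = [w0] from rfl]
    exact (head_insert_fold rest w0 [] (by intro y hy; simp at hy)).symm
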